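-- pv_equiv track=rewrite | github.com/usanjosedocumentos-svg/validatitulos | app.py | extraer_datos_diploma
-- ===== SOURCE A (Python) =====
-- def extraer_datos_diploma(texto):
--     lineas = [l.strip() for l in texto.strip().split("\n") if l.strip()]
--     tl = texto.lower()
--     kn = {"doctorado":["doctorado","doctor en","phd"],"maestria":["maestria","master","magister"],"especializacion":["especializacion","especialista en"],"tecnologo":["tecnologo","tecnologia en"],"tecnico":["tecnico laboral","tecnico en","formacion tecnica"],"bachillerato":["bachiller","bachillerato"],"universitario":["ingeniero","ingeniera","administrador","licenciado","arquitecto","contador","medico","abogado","psicologo","economista"]}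
--     nivel = "universitario"
--     for nv, kws in kn.items():
--         if any(k in tl for k in kws): nivel = nv; break
--     titulo = ""
--     for i, linea in enumerate(lineas):
--         if any(t in linea.lower() for t in ["titulo de","otorga el titulo","grado de","programa de","titulo en"]):
--             if i + 1 < len(lineas): titulo = lineas[i+1]; break
--     if not titulo:
--         for nv, kws in kn.items():
--             for linea in lineas:
--                 if any(k in linea.lower() for k in kws) and len(linea) > 8: titulo = linea; break
--             if titulo: break
--     univ = ""
--     for linea in lineas:
--         if any(k in linea.lower() for k in ["universidad","institucion universitaria","corporacion","fundacion universitaria","tecnologico","politecnico","sena"]):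
--             univ = linea; break
--     pais = "Colombia"
--     for c, v in {"colombia":"Colombia","mexico":"Mexico","argentina":"Argentina","chile":"Chile","peru":"Peru","ecuador":"Ecuador"}.items():
--         if c in tl: pais = v; break
--     titular = ""
--     for i, linea in enumerate(lineas):
--         if any(t in linea.lower() for t in ["otorga a","conferido a","se otorga a","a nombre de"]):
--             if i + 1 < len(lineas): titular = lineas[i+1]; break
--     return titulo, univ, pais, nivel, titular
-- ===== SOURCE B (Python) =====
-- KN = [("doctorado", ["doctorado", "doctor en", "phd"]),
--       ("maestria", ["maestria", "master", "magister"]),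
--       ("especializacion", ["especializacion", "especialista en"]),
--       ("tecnologo", ["tecnologo", "tecnologia en"]),
--       ("tecnico", ["tecnico laboral", "tecnico en", "formacion tecnica"]),
--       ("bachillerato", ["bachiller", "bachillerato"]),
--       ("universitario", ["ingeniero", "ingeniera", "administrador", "licenciado",
--                          "arquitecto", "contador", "medico", "abogado", "psicologo",
--                          "economista"])]
-- TIT_TRIGGERS = ["titulo de", "otorga el titulo", "grado de", "programa de", "titulo en"]
-- TITULAR_TRIGGERS = ["otorga a", "conferido a", "se otorga a", "a nombre de"]
-- UNIV_KWS = ["universidad", "institucion universitaria", "corporacion",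
--             "fundacion universitaria", "tecnologico", "politecnico", "sena"]
-- PAISES = [("colombia", "Colombia"), ("mexico", "Mexico"), ("argentina", "Argentina"),
--           ("chile", "Chile"), ("peru", "Peru"), ("ecuador", "Ecuador")]
--
--
-- def extraer_datos_diploma(texto):
--     lineas = [l.strip() for l in texto.strip().split("\n") if l.strip()]
--     tl = texto.lower()
--     nivel = next((nv for nv, kws in KN if any(k in tl for k in kws)), "universitario")
--     pais = next((v for c, v in PAISES if c in tl), "Colombia")
--     titulo = univ = titular = ""
--     prev = None
--     for linea in lineas:
--         if prev is not None:
--             pl = prev.lower()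
--             if not titulo and any(t in pl for t in TIT_TRIGGERS):
--                 titulo = linea
--             if not titular and any(t in pl for t in TITULAR_TRIGGERS):
--                 titular = linea
--         if not univ and any(k in linea.lower() for k in UNIV_KWS):
--             univ = linea
--         prev = linea
--     if not titulo:
--         for nv, kws in KN:
--             titulo = next((l for l in lineas
--                            if any(k in l.lower() for k in kws) and len(l) > 8), "")
--             if titulo:
--                 break
--     return titulo, univ, pais, nivel, titular
-- ===== Notes on version B (the rewrite author's own statement) =====
-- stated objective: alternative
-- what changed: A's three separate line-order scans (titulo-trigger successor, universidad keyword, titular-trigger successor) are fused into one previous-line-tracking pass that assigns each field only while it is still empty, and the nivel/pais/fallback scans become first-match next()/find-style lookups over module-level keyword tables instead of loops with break.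
import Mathlib
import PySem

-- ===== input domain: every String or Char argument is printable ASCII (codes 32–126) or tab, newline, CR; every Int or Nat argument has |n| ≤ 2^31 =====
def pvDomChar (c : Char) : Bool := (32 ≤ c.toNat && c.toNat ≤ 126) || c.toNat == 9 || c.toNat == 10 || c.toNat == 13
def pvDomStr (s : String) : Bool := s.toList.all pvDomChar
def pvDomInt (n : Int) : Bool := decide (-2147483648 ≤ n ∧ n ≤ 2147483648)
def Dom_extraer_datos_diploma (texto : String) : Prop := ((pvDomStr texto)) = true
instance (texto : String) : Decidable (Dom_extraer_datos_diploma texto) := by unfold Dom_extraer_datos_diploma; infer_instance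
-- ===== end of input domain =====

-- B replaces A's three separate line-order scans (titulo trigger, universidad, titular trigger)
-- by ONE pass over the lines that tracks the previous line; objective: alternative decomposition.

-- keyword tables (B's Python keeps them at module level; shared by both ports)
def pvKN : List (String × List String) :=
  [("doctorado", ["doctorado", "doctor en", "phd"]),
   ("maestria", ["maestria", "master", "magister"]),
   ("especializacion", ["especializacion", "especialista en"]),
   ("tecnologo", ["tecnologo", "tecnologia en"]),
   ("tecnico", ["tecnico laboral", "tecnico en", "formacion tecnica"]),
   ("bachillerato", ["bachiller", "bachillerato"]),
   ("universitario", ["ingeniero", "ingeniera", "administrador", "licenciado",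
                      "arquitecto", "contador", "medico", "abogado", "psicologo",
                      "economista"])]
def pvTitTrig : List String := ["titulo de", "otorga el titulo", "grado de", "programa de", "titulo en"]
def pvTitularTrig : List String := ["otorga a", "conferido a", "se otorga a", "a nombre de"]
def pvUnivKws : List String := ["universidad", "institucion universitaria", "corporacion",
                                "fundacion universitaria", "tecnologico", "politecnico", "sena"]
def pvPaises : List (String × String) :=
  [("colombia", "Colombia"), ("mexico", "Mexico"), ("argentina", "Argentina"),
   ("chile", "Chile"), ("peru", "Peru"), ("ecuador", "Ecuador")]

-- ===== PORT A =====
-- 'for nv, kws in kn.items(): if any(...): nivel = nv; break'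
def pvNivelScanA (tl : String) : List (String × List String) → String
  | [] => "universitario"
  | (nv, kws) :: rest =>
      if kws.any (fun k => PySem.Str.isIn k tl) then nv else pvNivelScanA tl rest

-- first titulo-trigger line that has a successor yields the successor; a trigger on the
-- last line has no i+1, so the loop just runs off the end ("")
def pvTituloScanA : List String → String
  | [] => ""
  | l :: rest =>
      if pvTitTrig.any (fun t => PySem.Str.isIn t (PySem.Str.lower l)) then
        match rest with
        | [] => ""
        | n :: _ => n
      else pvTituloScanA rest

-- inner 'for linea in lineas: if any(...) and len(linea) > 8: titulo = linea; break'
def pvFallbackInnerA (kws : List String) : List String → String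
  | [] => ""
  | l :: rest =>
      if kws.any (fun k => PySem.Str.isIn k (PySem.Str.lower l)) && decide (8 < PySem.Str.len l)
      then l else pvFallbackInnerA kws rest

-- outer 'for nv, kws in kn.items(): ...; if titulo: break'
def pvFallbackA (lineas : List String) : List (String × List String) → String
  | [] => ""
  | (_, kws) :: rest =>
      let t := pvFallbackInnerA kws lineas
      if t != "" then t else pvFallbackA lineas rest

def pvUnivScanA : List String → String
  | [] => ""
  | l :: rest =>
      if pvUnivKws.any (fun k => PySem.Str.isIn k (PySem.Str.lower l)) then l
      else pvUnivScanA rest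

def pvPaisScanA (tl : String) : List (String × String) → String
  | [] => "Colombia"
  | (c, v) :: rest => if PySem.Str.isIn c tl then v else pvPaisScanA tl rest

def pvTitularScanA : List String → String
  | [] => ""
  | l :: rest =>
      if pvTitularTrig.any (fun t => PySem.Str.isIn t (PySem.Str.lower l)) then
        match rest with
        | [] => ""
        | n :: _ => n
      else pvTitularScanA rest

def extraer_datos_diploma (texto : String) : String × String × String × String × String :=
  let lineas := (((PySem.Str.split? (PySem.Str.strip texto) "\n").getD []).map PySem.Str.strip).filter (fun l => l != "")
  let tl := PySem.Str.lower texto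
  let nivel := pvNivelScanA tl pvKN
  let t0 := pvTituloScanA lineas
  let titulo := if t0 == "" then pvFallbackA lineas pvKN else t0
  let univ := pvUnivScanA lineas
  let pais := pvPaisScanA tl pvPaises
  let titular := pvTitularScanA lineas
  (titulo, univ, pais, nivel, titular)

-- ===== PORT B =====
-- the single pass: prev is the previous line; each field is assigned only while still empty
def pvPassB : Option String → String → String → String → List String → String × String × String
  | _, t, u, r, [] => (t, u, r)
  | prev, t, u, r, l :: rest =>
      let t' := match prev with
        | some p => if t == "" && pvTitTrig.any (fun s => PySem.Str.isIn s (PySem.Str.lower p)) then l else t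
        | none => t
      let r' := match prev with
        | some p => if r == "" && pvTitularTrig.any (fun s => PySem.Str.isIn s (PySem.Str.lower p)) then l else r
        | none => r
      let u' := if u == "" && pvUnivKws.any (fun k => PySem.Str.isIn k (PySem.Str.lower l)) then l else u
      pvPassB (some l) t' u' r' rest

-- 'titulo = next((l for l in lineas if ... and len(l) > 8), ""); if titulo: break'
def pvFallbackB (lineas : List String) : List (String × List String) → String
  | [] => ""
  | (_, kws) :: rest =>
      let t := (lineas.find? (fun l => kws.any (fun k => PySem.Str.isIn k (PySem.Str.lower l)) && decide (8 < PySem.Str.len l))).getD ""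
      if t != "" then t else pvFallbackB lineas rest

def extraer_datos_diploma_alt (texto : String) : String × String × String × String × String :=
  let lineas := (((PySem.Str.split? (PySem.Str.strip texto) "\n").getD []).map PySem.Str.strip).filter (fun l => l != "")
  let tl := PySem.Str.lower texto
  let nivel := ((pvKN.find? (fun p => p.2.any (fun k => PySem.Str.isIn k tl))).map (fun p => p.1)).getD "universitario"
  let pais := ((pvPaises.find? (fun p => PySem.Str.isIn p.1 tl)).map (fun p => p.2)).getD "Colombia"
  let s := pvPassB none "" "" "" lineas
  let titulo := if s.1 == "" then pvFallbackB lineas pvKN else s.1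
  (titulo, s.2.1, pais, nivel, s.2.2)

-- ===== PRECONDITION & SPEC =====
def Spec_extraer_datos_diploma (texto : String) (out : String × String × String × String × String) : Prop := out = extraer_datos_diploma_alt texto
instance (texto : String) (out : String × String × String × String × String) : Decidable (Spec_extraer_datos_diploma texto out) := by unfold Spec_extraer_datos_diploma; infer_instance

-- ===== CLAIM (what is proved, stated in full; the proofs are below) =====
def Claim_equal_extraer_datos_diploma : Prop := ∀ (texto : String), Dom_extraer_datos_diploma texto → Spec_extraer_datos_diploma texto (extraer_datos_diploma texto)

-- ===== LEMMAS AND PROOFS =====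
theorem pvNivelScanA_eq (tl : String) (ks : List (String × List String)) :
    pvNivelScanA tl ks
      = ((ks.find? (fun p => p.2.any (fun k => PySem.Str.isIn k tl))).map (fun p => p.1)).getD "universitario" := by
  induction ks with
  | nil => rfl
  | cons h rest ih =>
      obtain ⟨nv, kws⟩ := h
      simp only [pvNivelScanA]
      split_ifs with hc
      · rw [List.find?_cons_of_pos (p := fun q => q.2.any fun k => PySem.Str.isIn k tl) (a := (nv, kws)) hc]; rfl
      · rw [List.find?_cons_of_neg (p := fun q => q.2.any fun k => PySem.Str.isIn k tl) (a := (nv, kws)) (by simpa using hc)]; exact ih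

theorem pvPaisScanA_eq (tl : String) (ps : List (String × String)) :
    pvPaisScanA tl ps
      = ((ps.find? (fun p => PySem.Str.isIn p.1 tl)).map (fun p => p.2)).getD "Colombia" := by
  induction ps with
  | nil => rfl
  | cons h rest ih =>
      obtain ⟨c, v⟩ := h
      simp only [pvPaisScanA]
      split_ifs with hc
      · rw [List.find?_cons_of_pos (p := fun q => PySem.Str.isIn q.1 tl) (a := (c, v)) hc]; rfl
      · rw [List.find?_cons_of_neg (p := fun q => PySem.Str.isIn q.1 tl) (a := (c, v)) (by simpa using hc)]; exact ih

theorem pvFallbackInnerA_eq (kws : List String) (ls : List String) :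
    pvFallbackInnerA kws ls
      = (ls.find? (fun l => kws.any (fun k => PySem.Str.isIn k (PySem.Str.lower l)) && decide (8 < PySem.Str.len l))).getD "" := by
  induction ls with
  | nil => rfl
  | cons l rest ih =>
      simp only [pvFallbackInnerA]
      split_ifs with hc
      · rw [List.find?_cons_of_pos (p := fun x => (kws.any fun k => PySem.Str.isIn k (PySem.Str.lower x)) && decide (8 < PySem.Str.len x)) hc]; rfl
      · rw [List.find?_cons_of_neg (p := fun x => (kws.any fun k => PySem.Str.isIn k (PySem.Str.lower x)) && decide (8 < PySem.Str.len x)) (by simpa using hc)]; exact ih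

theorem pvFallback_eq (lineas : List String) (ks : List (String × List String)) :
    pvFallbackA lineas ks = pvFallbackB lineas ks := by
  induction ks with
  | nil => rfl
  | cons h rest ih =>
      obtain ⟨nv, kws⟩ := h
      simp only [pvFallbackA, pvFallbackB, pvFallbackInnerA_eq]
      split_ifs <;> simp_all

theorem pvTituloScanA_cons (l : String) (rest : List String) :
    pvTituloScanA (l :: rest)
      = if pvTitTrig.any (fun t => PySem.Str.isIn t (PySem.Str.lower l)) then rest.headD ""
        else pvTituloScanA rest := by
  cases rest <;> rfl

theorem pvTitularScanA_cons (l : String) (rest : List String) :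
    pvTitularScanA (l :: rest)
      = if pvTitularTrig.any (fun t => PySem.Str.isIn t (PySem.Str.lower l)) then rest.headD ""
        else pvTitularScanA rest := by
  cases rest <;> rfl

theorem pvPassB_some (ls : List String) : ∀ (p t u r : String), (∀ x ∈ ls, x ≠ "") →
    pvPassB (some p) t u r ls
      = ((if t = "" then (if pvTitTrig.any (fun s => PySem.Str.isIn s (PySem.Str.lower p)) then ls.headD "" else pvTituloScanA ls) else t),
         (if u = "" then pvUnivScanA ls else u),
         (if r = "" then (if pvTitularTrig.any (fun s => PySem.Str.isIn s (PySem.Str.lower p)) then ls.headD "" else pvTitularScanA ls) else r)) := by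
  induction ls with
  | nil =>
      intro p t u r _
      simp only [pvPassB, pvTituloScanA, pvUnivScanA, pvTitularScanA, List.headD]
      split_ifs <;> simp_all
  | cons l rest ih =>
      intro p t u r h
      have hl : l ≠ "" := h l (by simp)
      have hrest : ∀ x ∈ rest, x ≠ "" := fun x hx => h x (by simp [hx])
      simp only [pvPassB]
      rw [ih _ _ _ _ hrest, pvTituloScanA_cons, pvTitularScanA_cons]
      simp only [Prod.mk.injEq, pvUnivScanA]
      refine ⟨?_, ?_, ?_⟩
      · by_cases ht : t = ""
        · by_cases hp : ∃ x ∈ pvTitTrig, PySem.Chars.isIn x.toList (PySem.Chars.lower p.toList) = true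
          · simp [ht, hp, hl]
          · simp [ht, hp]
        · simp [ht]
      · by_cases hu : u = ""
        · by_cases hcl : ∃ x ∈ pvUnivKws, PySem.Chars.isIn x.toList (PySem.Chars.lower l.toList) = true
          · simp [hu, hcl, hl]
          · simp [hu, hcl]
        · simp [hu]
      · by_cases hr : r = ""
        · by_cases hp : ∃ x ∈ pvTitularTrig, PySem.Chars.isIn x.toList (PySem.Chars.lower p.toList) = true
          · simp [hr, hp, hl]
          · simp [hr, hp]
        · simp [hr]

theorem pvPassB_none (ls : List String) (h : ∀ x ∈ ls, x ≠ "") :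
    pvPassB none "" "" "" ls = (pvTituloScanA ls, pvUnivScanA ls, pvTitularScanA ls) := by
  cases ls with
  | nil => rfl
  | cons l rest =>
      have hl : l ≠ "" := h l (by simp)
      have hrest : ∀ x ∈ rest, x ≠ "" := fun x hx => h x (by simp [hx])
      simp only [pvPassB]
      rw [pvPassB_some rest _ _ _ _ hrest, pvTituloScanA_cons, pvTitularScanA_cons]
      simp only [Prod.mk.injEq, pvUnivScanA]
      refine ⟨by simp, ?_, by simp⟩
      by_cases hcl : ∃ x ∈ pvUnivKws, PySem.Chars.isIn x.toList (PySem.Chars.lower l.toList) = true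
      · simp [hcl, hl]
      · simp [hcl]

-- ===== VERDICT (by name: the statement is the Claim_ definition above) =====
theorem extraer_datos_diploma_spec : Claim_equal_extraer_datos_diploma := by
  intro texto _
  unfold Spec_extraer_datos_diploma extraer_datos_diploma extraer_datos_diploma_alt
  simp only
  set lineas := (((PySem.Str.split? (PySem.Str.strip texto) "\n").getD []).map PySem.Str.strip).filter (fun l => l != "") with hlin
  have hne : ∀ x ∈ lineas, x ≠ "" := by
    intro x hx
    have := (List.mem_filter.mp (hlin ▸ hx)).2
    simpa using this
  rw [pvPassB_none lineas hne, pvNivelScanA_eq, pvPaisScanA_eq, pvFallback_eq]
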